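/- GENERATED by farm/mkstatement.py from design/units.tsv (unit `compute_codewords.5`) and the assertions of Vorbis/Spec/Codebook/Codewords.lean — do not edit.
   THE STATEMENT of the proof unit `compute_codewords.5`: segment 5 of `compute_codewords` (20 instructions; entries 0x108345;
   exits 0x10835c,ret; ranges 0x108345-0x108359 + 0x1083a9-0x1083ae + 0x1083b3-0x1083dc)
   takes each of its entry assertions to one of its exit assertions (`Vorbis.Spec.compute_codewords.Seg5`), given the contracts of its callees.
   What the names mean: Vorbis/Spec/Basic.lean (the shared hypotheses), Vorbis/Spec/Codebook/Codewords.lean (the assertions). The theorem to prove: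
   `theorem compute_codewords_5_ok : Vorbis.Spec.compute_codewords_5.Statement`. -/
import Vorbis.Spec.Codebook.Codewords
namespace Vorbis.Spec.compute_codewords_5
open X86 X86.User Asan

/-- The statement of unit `compute_codewords.5`. -/
def Statement : Prop :=
  ∀ (Lay : Layout) (_hLay : Lay.hi = 0x1000000) (μ : Microarch) (_hμ : UserX.MicroOK μ) (u₀ : State)
    (_hcode : HasCodeNat Lay u₀ Vorbis.L.compute_codewords.entry Vorbis.Code.code_compute_codewords.nat Vorbis.L.compute_codewords.size),
    Vorbis.Spec.compute_codewords.Seg5 Lay μ u₀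

end Vorbis.Spec.compute_codewords_5
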